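-- pv_equiv track=rewrite | github.com/ruperthjr/meyousafe | backend/app/utils/reference_code.py | validate_reference_code
-- ===== SOURCE A (Python) =====
-- def validate_reference_code(code: str) -> bool:
--     """
--     Validate reference code format.
--     """
--     if not code:
--         return False
--
--     parts = code.split('-')
--     if len(parts) != 3:
--         return False
--
--     for part in parts:
--         if len(part) != 4:
--             return False
--         if not part.isalnum():
--             return False
--
--     return True
-- ===== SOURCE B (Python) =====
-- def validate_reference_code(code: str) -> bool:
--     """
--     Validate reference code format (positional check, no split).
--     """
--     if len(code) != 14 or code[4] != '-' or code[9] != '-':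
--         return False
--     return code[0:4].isalnum() and code[5:9].isalnum() and code[10:14].isalnum()
-- ===== Notes on version B (the rewrite author's own statement) =====
-- stated objective: simpler
-- what changed: Replaces the split('-')-and-loop-over-parts validation by a direct positional check: length 14, dashes at indices 4 and 9, and isalnum on the three fixed slices.
import Mathlib
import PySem

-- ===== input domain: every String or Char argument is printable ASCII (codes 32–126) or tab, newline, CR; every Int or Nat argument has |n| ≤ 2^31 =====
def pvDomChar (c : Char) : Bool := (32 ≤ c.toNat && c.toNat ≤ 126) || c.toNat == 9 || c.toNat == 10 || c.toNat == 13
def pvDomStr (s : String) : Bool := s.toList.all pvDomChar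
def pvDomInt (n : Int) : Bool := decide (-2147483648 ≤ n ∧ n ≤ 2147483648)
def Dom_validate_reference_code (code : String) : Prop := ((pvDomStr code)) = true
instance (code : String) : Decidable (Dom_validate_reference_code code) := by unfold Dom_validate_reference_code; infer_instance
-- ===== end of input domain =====

-- B replaces A's split('-')-and-loop validation by a direct positional check (length 14,
-- dashes at indices 4 and 9, isalnum on the three fixed slices); objective: simpler.

-- ===== PORT A =====
-- the 'for part in parts' loop with its two early returns
def vrcLoopA : List (List Char) → Bool
  | [] => true
  | p :: rest =>
    if PySem.Chars.len p ≠ 4 then false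
    else if ¬ PySem.Chars.strIsalnum p then false
    else vrcLoopA rest

def validate_reference_code (code : String) : Bool :=
  if code.toList.isEmpty then false            -- 'if not code: return False'
  else
    -- parts = code.split('-');  sep "-" is nonempty so split? is always 'some'
    let parts := (PySem.Str.split? code "-").getD []
    if parts.length ≠ 3 then false
    else vrcLoopA (parts.map String.toList)

-- ===== PORT B =====
def validate_reference_code_alt (code : String) : Bool :=
  if code.toList.length ≠ 14 then false
  else if PySem.List.pyGet? code.toList 4 ≠ some '-' then false    -- code[4] != '-'
  else if PySem.List.pyGet? code.toList 9 ≠ some '-' then false    -- code[9] != '-'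
  else PySem.Chars.strIsalnum (PySem.List.slice code.toList (some 0) (some 4))
    && PySem.Chars.strIsalnum (PySem.List.slice code.toList (some 5) (some 9))
    && PySem.Chars.strIsalnum (PySem.List.slice code.toList (some 10) (some 14))

-- ===== PRECONDITION & SPEC =====
def Spec_validate_reference_code (code : String) (out : Bool) : Prop := out = validate_reference_code_alt code
instance (code : String) (out : Bool) : Decidable (Spec_validate_reference_code code out) := by unfold Spec_validate_reference_code; infer_instance

-- ===== CLAIM (what is proved, stated in full; the proofs are below) =====
def Claim_equal_validate_reference_code : Prop := ∀ (code : String), Dom_validate_reference_code code → Spec_validate_reference_code code (validate_reference_code code)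

-- ===== LEMMAS AND PROOFS =====

-- simple split-on-one-character recursion used to characterise PySem.Chars.splitOn ['-']
def vrcSplit (s : Char) (pre : List Char) : List Char → List (List Char)
  | [] => [pre]
  | c :: rest => if c = s then pre :: vrcSplit s [] rest else vrcSplit s (pre ++ [c]) rest

theorem vrcSplit_ne_nil (s : Char) (pre l : List Char) : vrcSplit s pre l ≠ [] := by
  induction l generalizing pre with
  | nil => simp [vrcSplit]
  | cons c rest ih => by_cases h : c = s <;> simp [vrcSplit, h, ih]

theorem vrc_go_eq (s : Char) (l : List Char) (fuel : Nat) (cur : List Char)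
    (acc : List (List Char)) (hf : l.length < fuel) :
    PySem.Chars.splitOn.go [s] fuel l cur acc
      = acc.reverse ++ vrcSplit s cur.reverse l := by
  induction l generalizing fuel cur acc with
  | nil =>
    cases fuel with
    | zero => omega
    | succ f => simp [PySem.Chars.splitOn.go, vrcSplit]
  | cons c rest ih =>
    cases fuel with
    | zero => omega
    | succ f =>
      by_cases h : c = s
      · subst h
        have : [c].isPrefixOf (c :: rest) = true := by simp [List.isPrefixOf]
        simp only [PySem.Chars.splitOn.go, this, if_pos, List.length_singleton,
          List.drop_succ_cons, List.drop_zero]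
        rw [ih f [] (cur.reverse :: acc) (by simpa using Nat.lt_of_succ_lt_succ hf)]
        simp [vrcSplit]
      · have : [s].isPrefixOf (c :: rest) = false := by
          simp [List.isPrefixOf]; exact fun hcs => (h hcs.symm).elim
        simp only [PySem.Chars.splitOn.go, this, Bool.false_eq_true, if_neg, not_false_iff]
        rw [ih f (c :: cur) acc (by simpa using Nat.lt_of_succ_lt_succ hf)]
        simp [vrcSplit, h]

theorem vrc_splitOn_eq (s : Char) (l : List Char) :
    PySem.Chars.splitOn l [s] = vrcSplit s [] l := by
  have := vrc_go_eq s l (l.length + 1) [] [] (by omega)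
  simpa [PySem.Chars.splitOn] using this

-- joining the pieces with the separator rebuilds the input
def vrcJoin (s : Char) : List (List Char) → List Char
  | [] => []
  | [p] => p
  | p :: q :: ps => p ++ s :: vrcJoin s (q :: ps)

theorem vrcJoin_cons (s : Char) (p : List Char) (ps : List (List Char)) (h : ps ≠ []) :
    vrcJoin s (p :: ps) = p ++ s :: vrcJoin s ps := by
  cases ps with
  | nil => exact absurd rfl h
  | cons q t => rfl

theorem vrc_join (s : Char) (pre l : List Char) :
    vrcJoin s (vrcSplit s pre l) = pre ++ l := by
  induction l generalizing pre with
  | nil => simp [vrcSplit, vrcJoin]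
  | cons c rest ih =>
    by_cases h : c = s
    · subst h
      simp only [vrcSplit, if_true]
      rw [vrcJoin_cons _ _ _ (vrcSplit_ne_nil _ _ _), ih]
      simp
    · simp only [vrcSplit, h, if_neg, not_false_iff]
      rw [ih]; simp

-- splits of a dash-free list, and of a list with a leading dash-free block
theorem vrcSplit_no_sep (s : Char) (pre p : List Char) (hp : s ∉ p) :
    vrcSplit s pre p = [pre ++ p] := by
  induction p generalizing pre with
  | nil => simp [vrcSplit]
  | cons c rest ih =>
    have hc : c ≠ s := fun h => hp (h ▸ List.mem_cons_self ..)
    simp only [vrcSplit, hc, if_neg, not_false_iff]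
    rw [ih _ (fun h => hp (List.mem_cons_of_mem _ h))]
    simp

theorem vrcSplit_block (s : Char) (pre p rest : List Char) (hp : s ∉ p) :
    vrcSplit s pre (p ++ s :: rest) = (pre ++ p) :: vrcSplit s [] rest := by
  induction p generalizing pre with
  | nil => simp [vrcSplit]
  | cons c t ih =>
    have hc : c ≠ s := fun h => hp (h ▸ List.mem_cons_self ..)
    simp only [List.cons_append, vrcSplit, hc, if_neg, not_false_iff]
    rw [ih _ (fun h => hp (List.mem_cons_of_mem _ h))]
    simp

theorem vrc_len3 (ps : List (List Char)) (h : ps.length = 3) :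
    ∃ p q r, ps = [p, q, r] := by
  match ps, h with
  | [p, q, r], _ => exact ⟨p, q, r, rfl⟩

theorem vrc_len4 (l : List Char) (h : l.length = 4) :
    ∃ a b c d, l = [a, b, c, d] := by
  match l, h with
  | [a, b, c, d], _ => exact ⟨a, b, c, d, rfl⟩

theorem vrc_alnum_ne_dash (c : Char) (h : PySem.Chars.isalnum c = true) : c ≠ '-' := by
  intro he; subst he; exact absurd h (by decide)

theorem vrc_split_getD (code : String) :
    (PySem.Str.split? code "-").getD [] = (vrcSplit '-' [] code.toList).map String.ofList := by
  simp only [PySem.Str.split?, PySem.Chars.split?]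
  rw [show ("-" : String).toList = ['-'] from rfl]
  rw [if_neg (by decide : ¬((['-'] : List Char).isEmpty = true))]
  rw [vrc_splitOn_eq]
  rfl

theorem vrc_map_toList_ofList (ps : List (List Char)) :
    (ps.map String.ofList).map String.toList = ps := by
  simp [List.map_map, Function.comp_def]

theorem vrc_fwd (code : String) (hA : validate_reference_code code = true) :
    validate_reference_code_alt code = true := by
  unfold validate_reference_code at hA
  simp only [vrc_split_getD, vrc_map_toList_ofList, List.length_map] at hA
  split_ifs at hA with h0 hlen
  push Not at hlen
  obtain ⟨p1, p2, p3, hps⟩ := vrc_len3 _ hlen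
  have hl : code.toList = p1 ++ '-' :: (p2 ++ '-' :: p3) := by
    have := vrc_join '-' [] code.toList
    rw [hps] at this
    simpa [vrcJoin] using this.symm
  rw [hps] at hA
  simp [vrcLoopA, PySem.Chars.len_eq] at hA
  obtain ⟨hL1, hN1, hL2, hN2, hL3, hN3⟩ := hA
  have hL1' : p1.length = 4 := by exact_mod_cast hL1
  have hL2' : p2.length = 4 := by exact_mod_cast hL2
  have hL3' : p3.length = 4 := by exact_mod_cast hL3
  obtain ⟨a0, a1, a2, a3, rfl⟩ := vrc_len4 _ hL1'
  obtain ⟨b0, b1, b2, b3, rfl⟩ := vrc_len4 _ hL2'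
  obtain ⟨d0, d1, d2, d3, rfl⟩ := vrc_len4 _ hL3'
  simp only [PySem.Chars.strIsalnum, List.all_cons, List.all_nil, List.isEmpty_cons,
    Bool.not_false, Bool.true_and, Bool.and_true, Bool.and_eq_true] at hN1 hN2 hN3
  unfold validate_reference_code_alt
  rw [hl]
  simp only [List.cons_append, List.nil_append]
  simp [PySem.List.pyGet?, PySem.List.pyIdx?, PySem.List.slice, PySem.List.clampIdx,
    PySem.Chars.strIsalnum, hN1.1, hN1.2.1, hN1.2.2.1, hN1.2.2.2,
    hN2.1, hN2.2.1, hN2.2.2.1, hN2.2.2.2, hN3.1, hN3.2.1, hN3.2.2.1, hN3.2.2.2]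

theorem vrc_bwd (code : String) (hB : validate_reference_code_alt code = true) :
    validate_reference_code code = true := by
  unfold validate_reference_code_alt at hB
  split_ifs at hB with h1 h2 h3
  push Not at h1 h2 h3
  -- h1 : length = 14, h2 : l[4] = '-', h3 : l[9] = '-'
  obtain ⟨c0, c1, c2, c3, c4, c5, c6, c7, c8, c9', c10, c11, c12, c13, hl⟩ :
      ∃ c0 c1 c2 c3 c4 c5 c6 c7 c8 c9' c10 c11 c12 c13,
        code.toList = [c0, c1, c2, c3, c4, c5, c6, c7, c8, c9', c10, c11, c12, c13] := by
    match hll : code.toList, h1 with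
    | [c0, c1, c2, c3, c4, c5, c6, c7, c8, c9', c10, c11, c12, c13], _ =>
      exact ⟨_, _, _, _, _, _, _, _, _, _, _, _, _, _, rfl⟩
  rw [hl] at hB h2 h3
  have hc4 : c4 = '-' := by simpa [PySem.List.pyGet?, PySem.List.pyIdx?] using h2
  have hc9 : c9' = '-' := by simpa [PySem.List.pyGet?, PySem.List.pyIdx?] using h3
  subst hc4; subst hc9
  rw [show PySem.List.slice [c0, c1, c2, c3, '-', c5, c6, c7, c8, '-', c10, c11, c12, c13]
        (some 0) (some 4) = [c0, c1, c2, c3] from rfl,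
      show PySem.List.slice [c0, c1, c2, c3, '-', c5, c6, c7, c8, '-', c10, c11, c12, c13]
        (some 5) (some 9) = [c5, c6, c7, c8] from rfl,
      show PySem.List.slice [c0, c1, c2, c3, '-', c5, c6, c7, c8, '-', c10, c11, c12, c13]
        (some 10) (some 14) = [c10, c11, c12, c13] from rfl] at hB
  simp only [PySem.Chars.strIsalnum, List.all_cons, List.all_nil, List.isEmpty_cons,
    Bool.not_false, Bool.true_and, Bool.and_true, Bool.and_eq_true] at hB
  obtain ⟨⟨⟨h00, h01, h02, h03⟩, h10, h11, h12, h13⟩, h20, h21, h22, h23⟩ := hB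
  unfold validate_reference_code
  simp only [vrc_split_getD, vrc_map_toList_ofList, List.length_map, hl]
  have hsplit : vrcSplit '-' [] [c0, c1, c2, c3, '-', c5, c6, c7, c8, '-', c10, c11, c12, c13]
      = [[c0, c1, c2, c3], [c5, c6, c7, c8], [c10, c11, c12, c13]] := by
    have e1 : [c0, c1, c2, c3, '-', c5, c6, c7, c8, '-', c10, c11, c12, c13]
        = [c0, c1, c2, c3] ++ '-' :: ([c5, c6, c7, c8] ++ '-' :: [c10, c11, c12, c13]) := by
      simp
    rw [e1, vrcSplit_block _ _ _ _ (by
      simp [vrc_alnum_ne_dash _ h00 |>.symm, vrc_alnum_ne_dash _ h01 |>.symm,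
        vrc_alnum_ne_dash _ h02 |>.symm, vrc_alnum_ne_dash _ h03 |>.symm]),
      vrcSplit_block _ _ _ _ (by
      simp [vrc_alnum_ne_dash _ h10 |>.symm, vrc_alnum_ne_dash _ h11 |>.symm,
        vrc_alnum_ne_dash _ h12 |>.symm, vrc_alnum_ne_dash _ h13 |>.symm]),
      vrcSplit_no_sep _ _ _ (by
      simp [vrc_alnum_ne_dash _ h20 |>.symm, vrc_alnum_ne_dash _ h21 |>.symm,
        vrc_alnum_ne_dash _ h22 |>.symm, vrc_alnum_ne_dash _ h23 |>.symm])]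
    simp
  rw [hsplit]
  simp [vrcLoopA, PySem.Chars.len_eq, PySem.Chars.strIsalnum,
    h00, h01, h02, h03, h10, h11, h12, h13, h20, h21, h22, h23, Function.comp]

-- ===== VERDICT (by name: the statement is the Claim_ definition above) =====
theorem validate_reference_code_spec : Claim_equal_validate_reference_code := by
  intro code _
  unfold Spec_validate_reference_code
  cases hA : validate_reference_code code <;> cases hB : validate_reference_code_alt code
  · rfl
  · exact absurd (vrc_bwd code hB) (by simp [hA])
  · exact absurd (vrc_fwd code hA) (by simp [hB])
  · rfl
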